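-- pv_equiv track=rewrite | github.com/Golovolastik/my_algorithms | double_cola.py | who_is_next
-- ===== SOURCE A (Python) =====
-- def who_is_next(names, r):
-- 	if r <= len(names):
-- 		return names[r-1]
-- 	temp = len(names)
-- 	power = 1
-- 	while temp:
-- 		if (temp + 2**power * len(names)) >= r:
-- 			for i in range(len(names)):
-- 				temp += 2**power
-- 				if temp >= r:
-- 					return names[i]
-- 		else:
-- 			power += 1
-- 			temp += 2**(power - 1) * len(names)
-- ===== SOURCE B (Python) =====
-- def who_is_next(names, r):
--     n = len(names)
--     if r <= n:
--         return names[r-1]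
--     # round k: each name served 2**k times; n*(2**k - 1) people served before round k
--     k = 0
--     while n * (2**(k+1) - 1) < r:
--         k += 1
--     rem = r - n * (2**k - 1)
--     return names[(rem - 1) // (2**k)]
-- ===== Notes on version B (the rewrite author's own statement) =====
-- stated objective: alternative
-- what changed: B replaces A's per-person simulation of the final round (adding 2**power once per name until the total reaches r) by a closed form: find the round k with a geometric-sum test, then compute the name's index by one integer division (O(log(r/n)) vs A's O(log(r/n)+n); the harness's inputs keep r<len(names), so no speed is claimed).
-- outside the precondition, e.g. on who_is_next([], 1): A returns None, B does not finish within the time limit; on who_is_next(['a', 'b'], -2): A raises IndexError, B raises IndexError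
import Mathlib
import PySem

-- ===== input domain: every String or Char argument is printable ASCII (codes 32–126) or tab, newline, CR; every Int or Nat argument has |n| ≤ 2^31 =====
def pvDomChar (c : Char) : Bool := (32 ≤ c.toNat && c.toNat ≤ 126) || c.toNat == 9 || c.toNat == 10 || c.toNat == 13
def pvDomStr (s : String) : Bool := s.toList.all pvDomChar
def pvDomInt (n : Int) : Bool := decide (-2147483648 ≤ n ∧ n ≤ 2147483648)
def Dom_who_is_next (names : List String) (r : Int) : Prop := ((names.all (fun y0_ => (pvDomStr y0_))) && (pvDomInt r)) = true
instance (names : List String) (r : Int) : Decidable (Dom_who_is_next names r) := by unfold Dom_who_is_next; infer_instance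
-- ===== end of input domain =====

-- B replaces A's per-person simulation of the final round by a closed-form index
-- (round found by a geometric-sum test, position by integer division).

-- ===== PORT A =====
-- inner 'for i in range(len(names)): temp += 2**power; if temp >= r: return names[i]'
-- returns (some name, temp) on return, (none, temp) when the for-loop is exhausted
def pvAInner (names : List String) (r step : Int) (i : Nat) (temp : Int) : Option String × Int :=
  if h : i < names.length then
    if r ≤ temp + step then (some names[i], temp + step)
    else pvAInner names r step (i + 1) (temp + step)
  else (none, temp)
termination_by names.length - i

-- the 'while temp:' loop; fuel 64 suffices on the admitted domain (|r| ≤ 2^31)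
def pvALoop (names : List String) (r : Int) : Nat → Int → Nat → String
  | 0, _, _ => ""
  | fuel + 1, temp, power =>
    if temp ≠ 0 then
      if r ≤ temp + 2 ^ power * (names.length : Int) then
        match pvAInner names r (2 ^ power) 0 temp with
        | (some s, _) => s
        | (none, t) => pvALoop names r fuel t power
      else pvALoop names r fuel (temp + 2 ^ power * (names.length : Int)) (power + 1)
    else ""

def who_is_next (names : List String) (r : Int) : String :=
  if r ≤ (names.length : Int) then (PySem.List.pyGet? names (r - 1)).getD ""
  else pvALoop names r 64 (names.length : Int) 1

-- ===== PORT B =====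
-- 'while n * (2**(k+1) - 1) < r: k += 1'; fuel 64 suffices on the admitted domain
def pvBFindK (n r : Int) : Nat → Nat → Nat
  | 0, k => k
  | fuel + 1, k => if n * (2 ^ (k + 1) - 1) < r then pvBFindK n r fuel (k + 1) else k

def who_is_next_alt (names : List String) (r : Int) : String :=
  let n : Int := names.length
  if r ≤ n then (PySem.List.pyGet? names (r - 1)).getD ""
  else
    let k := pvBFindK n r 64 0
    let rem := r - n * (2 ^ k - 1)
    (PySem.List.pyGet? names (PySem.Int.floordiv (rem - 1) (2 ^ k))).getD ""

-- ===== PRECONDITION & SPEC =====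
-- Pre_ excludes inputs where A yields no String: names = [] (A returns None for r ≥ 1,
-- raises IndexError otherwise) and r ≤ -len(names) (A raises IndexError).
def Pre_who_is_next (names : List String) (r : Int) : Prop :=
  names ≠ [] ∧ -(names.length : Int) < r
instance (names : List String) (r : Int) : Decidable (Pre_who_is_next names r) := by
  unfold Pre_who_is_next; infer_instance

def pvWitness_who_is_next : List String × Int := (["a", "b"], 5)

def Spec_who_is_next (names : List String) (r : Int) (out : String) : Prop := out = who_is_next_alt names r
instance (names : List String) (r : Int) (out : String) : Decidable (Spec_who_is_next names r out) := by unfold Spec_who_is_next; infer_instance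

-- ===== CLAIM (what is proved, stated in full; the proofs are below) =====
def Claim_equal_who_is_next : Prop := ∀ (names : List String) (r : Int), Dom_who_is_next names r → Pre_who_is_next names r → Spec_who_is_next names r (who_is_next names r)

-- ===== LEMMAS AND PROOFS =====

theorem pvAInner_spec (names : List String) (r step temp0 : Int) (i0 : Nat)
    (h0 : i0 < names.length)
    (hge : r ≤ temp0 + ((i0 : Int) + 1) * step)
    (hlt : ∀ j : Nat, j < i0 → temp0 + ((j : Int) + 1) * step < r) :
    ∀ d i, i0 - i = d → i ≤ i0 →
      pvAInner names r step i (temp0 + (i : Int) * step)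
        = (some names[i0], temp0 + ((i0 : Int) + 1) * step) := by
  intro d
  induction d with
  | zero =>
    intro i hd hle
    have hi : i = i0 := by omega
    subst hi
    rw [pvAInner, dif_pos h0, if_pos (by linarith)]
    rw [show temp0 + (i : Int) * step + step = temp0 + ((i : Int) + 1) * step from by ring]
  | succ d ih =>
    intro i hd hle
    have hii : i < i0 := by omega
    rw [pvAInner, dif_pos (by omega), if_neg (by have := hlt i hii; linarith)]
    have hrw : temp0 + (i : Int) * step + step = temp0 + ((i + 1 : Nat) : Int) * step := by
      push_cast; ring
    rw [hrw]
    exact ih (i + 1) (by omega) (by omega)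

theorem pvALoop_spec (names : List String) (r : Int) (K i0 : Nat)
    (hn : 1 ≤ (names.length : Int))
    (hK : r ≤ (names.length : Int) * (2 ^ (K + 1) - 1))
    (hmin : ∀ j : Nat, j < K → (names.length : Int) * (2 ^ (j + 1) - 1) < r)
    (h0 : i0 < names.length)
    (hge : r ≤ (names.length : Int) * (2 ^ K - 1) + ((i0 : Int) + 1) * 2 ^ K)
    (hlt : ∀ j : Nat, j < i0 → (names.length : Int) * (2 ^ K - 1) + ((j : Int) + 1) * 2 ^ K < r) :
    ∀ fuel j, j < K → K ≤ j + fuel →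
      pvALoop names r fuel ((names.length : Int) * (2 ^ (j + 1) - 1)) (j + 1) = names[i0] := by
  intro fuel
  induction fuel with
  | zero => intro j h1 h2; omega
  | succ fuel ih =>
    intro j h1 h2
    have hpow : (1 : Int) ≤ 2 ^ (j + 1) - 1 := by
      have : (2 : Int) ≤ 2 ^ (j + 1) := by
        calc (2:Int) = 2 ^ 1 := by norm_num
        _ ≤ 2 ^ (j + 1) := by apply pow_le_pow_right₀ <;> omega
      linarith
    have htemp : (1 : Int) ≤ (names.length : Int) * (2 ^ (j + 1) - 1) := by nlinarith
    have hsum : (names.length : Int) * (2 ^ (j + 1) - 1) + 2 ^ (j + 1) * (names.length : Int)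
        = (names.length : Int) * (2 ^ (j + 1 + 1) - 1) := by ring
    rw [pvALoop, if_pos (by intro h; rw [h] at htemp; norm_num at htemp)]
    by_cases hjk : j + 1 = K
    · rw [if_pos (by rw [hsum, hjk]; exact hK)]
      have := pvAInner_spec names r (2 ^ (j + 1)) ((names.length : Int) * (2 ^ (j + 1) - 1)) i0
        h0 (by rw [hjk]; exact hge) (by intro m hm; rw [hjk]; exact hlt m hm) i0 0 (by omega) (by omega)
      have hz : (names.length : Int) * (2 ^ (j + 1) - 1) + ((0 : Nat) : Int) * 2 ^ (j + 1)
          = (names.length : Int) * (2 ^ (j + 1) - 1) := by push_cast; ring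
      rw [hz] at this
      rw [this]
    · have hj1 : j + 1 < K := by omega
      rw [if_neg (not_le.mpr (by rw [hsum]; exact hmin (j + 1) hj1)), hsum]
      exact ih (j + 1) hj1 (by omega)

theorem pvBFindK_spec (n r : Int) (K : Nat)
    (hK : r ≤ n * (2 ^ (K + 1) - 1))
    (hmin : ∀ j : Nat, j < K → n * (2 ^ (j + 1) - 1) < r) :
    ∀ fuel k, k ≤ K → K ≤ k + fuel → pvBFindK n r fuel k = K := by
  intro fuel
  induction fuel with
  | zero =>
    intro k h1 h2
    have : k = K := by omega
    rw [pvBFindK, this]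
  | succ fuel ih =>
    intro k h1 h2
    by_cases hk : k = K
    · rw [pvBFindK, if_neg (by rw [hk]; exact not_lt.mpr hK), hk]
    · rw [pvBFindK, if_pos (hmin k (by omega))]
      exact ih (k + 1) (by omega) (by omega)

-- ===== VERDICT (by name: the statement is the Claim_ definition above) =====
theorem who_is_next_spec : Claim_equal_who_is_next := by
  intro names r hdom hpre
  unfold Spec_who_is_next who_is_next who_is_next_alt
  obtain ⟨hne, hlow⟩ := hpre
  by_cases hle : r ≤ (names.length : Int)
  · simp only [if_pos hle]
  · simp only [if_neg hle]
    set n : Int := (names.length : Int) with hn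
    have hn1 : 1 ≤ n := by
      have : names.length ≠ 0 := fun h => hne (List.eq_nil_of_length_eq_zero h)
      omega
    have hr : n < r := not_le.mp hle
    have hrbound : r ≤ 2147483648 := by
      unfold Dom_who_is_next pvDomInt at hdom
      simp only [Bool.and_eq_true, decide_eq_true_eq] at hdom
      exact hdom.2.2
    -- the round K: smallest k with r ≤ n*(2^(k+1)-1)
    have hex : ∃ k : Nat, r ≤ n * (2 ^ (k + 1) - 1) := by
      refine ⟨31, ?_⟩
      have h1 : (2147483648 : Int) ≤ 2 ^ (31 + 1) - 1 := by norm_num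
      have h2 : (2 : Int) ^ (31 + 1) - 1 ≤ n * (2 ^ (31 + 1) - 1) := by nlinarith
      linarith
    set K := Nat.find hex with hKdef
    have hK : r ≤ n * (2 ^ (K + 1) - 1) := Nat.find_spec hex
    have hmin : ∀ j : Nat, j < K → n * (2 ^ (j + 1) - 1) < r := by
      intro j hj
      have := Nat.find_min hex hj
      omega
    have hK31 : K ≤ 31 := by
      apply Nat.find_le
      have h1 : (2147483648 : Int) ≤ 2 ^ (31 + 1) - 1 := by norm_num
      have h2 : (2 : Int) ^ (31 + 1) - 1 ≤ n * (2 ^ (31 + 1) - 1) := by nlinarith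
      linarith
    have hK1 : 1 ≤ K := by
      by_contra h
      have hK0 : K = 0 := by omega
      have := hK
      rw [hK0] at this
      norm_num at this
      linarith
    -- prefix served before round K is below r
    have hprefix : n * (2 ^ K - 1) < r := by
      have := hmin (K - 1) (by omega)
      have hKK : K - 1 + 1 = K := by omega
      rwa [hKK] at this
    set rem : Int := r - n * (2 ^ K - 1) with hremdef
    have hrem1 : 1 ≤ rem := by omega
    have hpowpos : (0 : Int) < 2 ^ K := by positivity
    set q : Int := (rem - 1) / 2 ^ K with hqdef
    have hq0 : 0 ≤ q := Int.ediv_nonneg (by omega) (le_of_lt hpowpos)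
    have hremub : rem ≤ n * 2 ^ K := by
      have : n * (2 ^ (K + 1) - 1) - n * (2 ^ K - 1) = n * 2 ^ K := by ring
      omega
    have hqlt : q < n := by
      rw [hqdef, Int.ediv_lt_iff_lt_mul hpowpos]
      nlinarith
    set i0 : Nat := q.toNat with hi0def
    have hqi : (i0 : Int) = q := Int.toNat_of_nonneg hq0
    have hi0len : i0 < names.length := by omega
    have hdm := Int.mul_ediv_add_emod (rem - 1) (2 ^ K)
    have he0 : 0 ≤ (rem - 1) % 2 ^ K := Int.emod_nonneg _ (by positivity)
    have helt : (rem - 1) % 2 ^ K < 2 ^ K := Int.emod_lt_of_pos _ hpowpos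
    rw [← hqdef] at hdm
    have hge : r ≤ n * (2 ^ K - 1) + ((i0 : Int) + 1) * 2 ^ K := by
      rw [hqi]; nlinarith
    have hlt : ∀ j : Nat, j < i0 → n * (2 ^ K - 1) + ((j : Int) + 1) * 2 ^ K < r := by
      intro j hj
      have hjq : (j : Int) + 1 ≤ q := by omega
      nlinarith
    -- A's side
    have hA : pvALoop names r 64 n 1 = names[i0] := by
      have hstart : n = n * (2 ^ (0 + 1) - 1) := by norm_num
      rw [hstart]
      exact pvALoop_spec names r K i0 hn1 hK hmin hi0len hge hlt 64 0 (by omega) (by omega)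
    -- B's side
    have hB : pvBFindK n r 64 0 = K := pvBFindK_spec n r K hK hmin 64 0 (by omega) (by omega)
    rw [hA, hB, ← hremdef]
    have hfd : PySem.Int.floordiv (rem - 1) (2 ^ K) = q := by
      rw [PySem.Int.floordiv_eq_ediv_of_pos hpowpos, hqdef]
    rw [hfd, ← hqi, PySem.List.pyGet?_natCast, List.getElem?_eq_getElem hi0len, Option.getD_some]
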